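-- pv_equiv track=rewrite | github.com/leolech14/standard-model-of-code | wave/tools/ai/aci/context_builder.py | get_critical_files_for_sets
-- ===== SOURCE A (Python) =====
-- from typing import List, Dict, Optional
--
-- def get_critical_files_for_sets(
--     sets: List[str],
--     sets_config: Dict
-- ) -> List[str]:
--     """Extract critical files from set configurations."""
--     critical = []
--     seen = set()
--
--     for set_name in sets:
--         set_def = sets_config.get(set_name, {})
--         files = set_def.get("critical_files", [])
--         for f in files:
--             if f not in seen:
--                 critical.append(f)
--                 seen.add(f)
--
--     return critical
-- ===== SOURCE B (Python) =====
-- def get_critical_files_for_sets(sets, sets_config):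
--     """Extract critical files from set configurations."""
--     flat = [f for s in sets for f in sets_config.get(s, {}).get("critical_files", [])]
--     return _first_keep(flat)
--
-- def _first_keep(lst):
--     # keep the head, delete every later copy of it, recurse on what is left
--     if not lst:
--         return []
--     head = lst[0]
--     return [head] + _first_keep([x for x in lst[1:] if x != head])
-- ===== Notes on version B (the rewrite author's own statement) =====
-- stated objective: alternative
-- what changed: Instead of a guarded accumulate loop with a seen-set, B flattens all critical files once and then deduplicates by a quicksort-style recursion: keep the head, filter every later copy of it out of the remainder, recurse; no membership structure is maintained.
import Mathlib
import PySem

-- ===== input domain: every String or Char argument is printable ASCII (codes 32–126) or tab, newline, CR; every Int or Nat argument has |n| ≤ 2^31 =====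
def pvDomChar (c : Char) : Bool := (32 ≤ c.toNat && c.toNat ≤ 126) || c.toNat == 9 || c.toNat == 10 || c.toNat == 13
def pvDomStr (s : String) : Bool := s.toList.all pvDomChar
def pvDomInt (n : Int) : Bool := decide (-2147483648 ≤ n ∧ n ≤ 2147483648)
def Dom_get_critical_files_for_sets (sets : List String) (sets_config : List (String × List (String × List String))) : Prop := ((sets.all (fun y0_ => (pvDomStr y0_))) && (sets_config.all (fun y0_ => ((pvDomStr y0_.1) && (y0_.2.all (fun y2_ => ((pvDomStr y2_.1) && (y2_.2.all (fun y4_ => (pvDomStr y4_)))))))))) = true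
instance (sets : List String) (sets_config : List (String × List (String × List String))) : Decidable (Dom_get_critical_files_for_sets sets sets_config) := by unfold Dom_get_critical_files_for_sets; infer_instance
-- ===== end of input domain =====

-- B replaces A's seen-set guarded accumulate loop by flatten + recursive remove-later-duplicates; alternative decomposition, no speed claim.

-- ===== PORT A =====
-- the files list of one set: sets_config.get(set_name, {}).get("critical_files", [])
def pvFilesOf (sets_config : List (String × List (String × List String))) (set_name : String) : List String :=
  PySem.Dict.getD (PySem.Dict.ofList (PySem.Dict.getD (PySem.Dict.ofList sets_config) set_name [])) "critical_files" []

def get_critical_files_for_sets (sets : List String) (sets_config : List (String × List (String × List String))) : List String :=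
  (sets.foldl
    (fun (st : List String × PySem.Set String) set_name =>
      (pvFilesOf sets_config set_name).foldl
        (fun st f =>
          if PySem.Set.contains st.2 f then st
          else (st.1 ++ [f], PySem.Set.add st.2 f))
        st)
    ([], PySem.Set.empty)).1

-- ===== PORT B =====
-- _first_keep: keep the head, drop every later copy of it, recurse on the rest
def pvFirstKeep : List String → List String
  | [] => []
  | h :: t => h :: pvFirstKeep (t.filter (fun x => x ≠ h))
termination_by l => l.length
decreasing_by
  simp only [List.length_cons, List.length_unattach, Nat.lt_succ_iff]
  exact le_trans (List.length_filter_le _ _) (by simp)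

def get_critical_files_for_sets_alt (sets : List String) (sets_config : List (String × List (String × List String))) : List String :=
  pvFirstKeep (sets.flatMap (fun set_name => pvFilesOf sets_config set_name))

-- ===== PRECONDITION & SPEC =====
def Spec_get_critical_files_for_sets (sets : List String) (sets_config : List (String × List (String × List String))) (out : List String) : Prop := out = get_critical_files_for_sets_alt sets sets_config
instance (sets : List String) (sets_config : List (String × List (String × List String))) (out : List String) : Decidable (Spec_get_critical_files_for_sets sets sets_config out) := by unfold Spec_get_critical_files_for_sets; infer_instance

-- ===== CLAIM =====
def Claim_equal_get_critical_files_for_sets : Prop := ∀ (sets : List String) (sets_config : List (String × List (String × List String))), Dom_get_critical_files_for_sets sets sets_config → Spec_get_critical_files_for_sets sets sets_config (get_critical_files_for_sets sets sets_config)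

-- ===== LEMMAS AND PROOFS =====

-- A's inner loop step, abbreviated for the lemmas
def pvStep (st : List String × PySem.Set String) (f : String) : List String × PySem.Set String :=
  if PySem.Set.contains st.2 f then st else (st.1 ++ [f], PySem.Set.add st.2 f)

-- the two components of A's state stay equal, and the loop is Set.add on both
theorem pvStep_fold (l : List String) (c : List String) :
    l.foldl pvStep (c, c) = (l.foldl PySem.Set.add c, l.foldl PySem.Set.add c) := by
  induction l generalizing c with
  | nil => rfl
  | cons f t ih =>
    simp only [List.foldl_cons]
    have hstep : pvStep (c, c) f = (PySem.Set.add c f, PySem.Set.add c f) := by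
      simp only [pvStep, PySem.Set.add]
      by_cases h : f ∈ c <;> simp [h]
    rw [hstep, ih]

-- foldl over a flatMap is the nested foldl
theorem pvFoldl_flatMap {α β σ : Type} (l : List α) (g : α → List β)
    (step : σ → β → σ) (init : σ) :
    (l.flatMap g).foldl step init = l.foldl (fun st x => (g x).foldl step st) init := by
  induction l generalizing init with
  | nil => rfl
  | cons x t ih => simp [List.flatMap_cons, List.foldl_append, ih]

-- dropping copies of an already-seen element does not change the seen-set fold
theorem pvFold_filter_mem (t : List String) (c : List String) (x : String) (hx : x ∈ c) :
    (t.filter (fun y => y ≠ x)).foldl PySem.Set.add c = t.foldl PySem.Set.add c := by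
  induction t generalizing c with
  | nil => rfl
  | cons y t ih =>
    by_cases h : y = x
    · subst h
      simp only [List.filter_cons, decide_not, ne_eq] at *
      have : PySem.Set.add c y = c := by simp [PySem.Set.add, hx]
      simp [List.foldl_cons, this, ih c hx]
    · have hfilt : (y :: t).filter (fun z => z ≠ x) = y :: t.filter (fun z => z ≠ x) := by
        simp [h]
      rw [hfilt]
      simp only [List.foldl_cons]
      exact ih _ (by simp [PySem.Set.add]; by_cases hm : y ∈ c <;> simp [hm, hx])

-- an element absent from the rest of the list commutes out of the seen-set fold
theorem pvFold_prepend (l : List String) (s : List String) (h : String) (hl : h ∉ l)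
    (hs : h ∉ s) :
    l.foldl PySem.Set.add (h :: s) = h :: l.foldl PySem.Set.add s := by
  induction l generalizing s with
  | nil => rfl
  | cons y t ih =>
    have hy : y ≠ h := fun e => hl (e ▸ List.mem_cons_self ..)
    simp only [List.foldl_cons]
    have hmem : (y ∈ h :: s) ↔ (y ∈ s) := by simp [hy]
    by_cases hm : y ∈ s
    · have e1 : PySem.Set.add (h :: s) y = h :: s := by simp [PySem.Set.add, hmem.mpr hm]
      have e2 : PySem.Set.add s y = s := by simp [PySem.Set.add, hm]
      rw [e1, e2]; exact ih _ (fun hh => hl (List.mem_cons_of_mem _ hh)) hs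
    · have e1 : PySem.Set.add (h :: s) y = h :: (s ++ [y]) := by
        simp [PySem.Set.add, hmem, hm]
      have e2 : PySem.Set.add s y = s ++ [y] := by simp [PySem.Set.add, hm]
      rw [e1, e2]
      exact ih _ (fun hh => hl (List.mem_cons_of_mem _ hh))
        (by simp [hs, Ne.symm hy])

-- the seen-set fold from empty IS the remove-later-duplicates recursion
theorem pvFold_eq_firstKeep (l : List String) :
    l.foldl PySem.Set.add [] = pvFirstKeep l := by
  induction hn : l.length using Nat.strong_induction_on generalizing l with
  | _ n ih =>
    match l, hn with
    | [], _ => simp [pvFirstKeep]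
    | h :: t, hn =>
      have hadd : PySem.Set.add ([] : List String) h = [h] := by simp [PySem.Set.add]
      have hnot : h ∉ t.filter (fun x => x ≠ h) := by simp
      calc (h :: t).foldl PySem.Set.add []
          = t.foldl PySem.Set.add [h] := by rw [List.foldl_cons, hadd]
        _ = (t.filter (fun y => y ≠ h)).foldl PySem.Set.add [h] :=
            (pvFold_filter_mem t [h] h (by simp)).symm
        _ = h :: (t.filter (fun y => y ≠ h)).foldl PySem.Set.add [] :=
            pvFold_prepend _ [] h hnot (by simp)
        _ = h :: pvFirstKeep (t.filter (fun y => y ≠ h)) := by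
            rw [ih (t.filter (fun y => y ≠ h)).length
              (by subst hn; simp [Nat.lt_succ_of_le (List.length_filter_le _ _)]) _ rfl]
        _ = pvFirstKeep (h :: t) := by rw [pvFirstKeep]

-- ===== VERDICT =====
theorem get_critical_files_for_sets_spec : Claim_equal_get_critical_files_for_sets := by
  intro sets sets_config _
  show get_critical_files_for_sets sets sets_config = get_critical_files_for_sets_alt sets sets_config
  unfold get_critical_files_for_sets get_critical_files_for_sets_alt
  rw [show (fun (st : List String × PySem.Set String) f =>
        if PySem.Set.contains st.2 f then st else (st.1 ++ [f], PySem.Set.add st.2 f)) = pvStep from rfl]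
  rw [← pvFoldl_flatMap sets (fun s => pvFilesOf sets_config s) pvStep ([], PySem.Set.empty)]
  have : (([] : List String), (PySem.Set.empty : PySem.Set String)) = (([] : List String), ([] : List String)) := rfl
  rw [this, pvStep_fold, pvFold_eq_firstKeep]
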